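-- pv_equiv track=rewrite | github.com/wxnn08/RepLord | foobar/en-route-salute.py | solution
-- ===== SOURCE A (Python) =====
-- def solution(s):
--     cont = 0
--     ans = 0
--     for c in s:
--         if c == '>':
--             cont += 1
--         if c == '<':
--            ans += cont
--     return ans*2
-- ===== SOURCE B (Python) =====
-- def solution(s):
--     total = 0
--     for i, c in enumerate(s):
--         if c == '>':
--             for d in s[i+1:]:
--                 if d == '<':
--                     total += 1
--     return total * 2
-- ===== Notes on version B (the rewrite author's own statement) =====
-- stated objective: alternative
-- what changed: Replaces the single pass with a running '>'-counter by explicit nested pairing: for each '>' an inner loop re-scans the suffix counting '<' characters.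
import Mathlib
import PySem

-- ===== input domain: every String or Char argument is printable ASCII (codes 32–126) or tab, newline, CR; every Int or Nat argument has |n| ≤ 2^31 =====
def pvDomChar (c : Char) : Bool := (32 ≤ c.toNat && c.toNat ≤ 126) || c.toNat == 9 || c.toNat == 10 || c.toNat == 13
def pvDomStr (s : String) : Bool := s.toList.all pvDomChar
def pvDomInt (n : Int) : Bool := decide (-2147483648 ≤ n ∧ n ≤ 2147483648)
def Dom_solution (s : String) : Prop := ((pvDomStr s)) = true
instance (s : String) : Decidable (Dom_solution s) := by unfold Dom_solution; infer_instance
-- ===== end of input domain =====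

-- B re-implements A's one-pass counter as explicit nested pairing (loop over each '>' with an inner re-scan of the suffix counting '<'); same value, alternative structure.

-- ===== PORT A =====
-- one pass: cont counts '>' seen so far, each '<' adds cont to ans; return ans*2
def solution (s : String) : Int :=
  let st := s.toList.foldl
    (fun (p : Int × Int) c =>
      let p := if c = '>' then (p.1 + 1, p.2) else p
      if c = '<' then (p.1, p.2 + p.1) else p)
    (0, 0)
  st.2 * 2

-- ===== PORT B =====
-- inner loop of Source B: count '<' in the suffix
def solutionAltInner (l : List Char) : Int :=
  l.foldl (fun t d => if d = '<' then t + 1 else t) 0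

-- outer loop: for each position, if the char is '>' add the count of '<' in the rest
def solutionAltGo (l : List Char) : Int :=
  match l with
  | [] => 0
  | c :: rest => (if c = '>' then solutionAltInner rest else 0) + solutionAltGo rest

def solution_alt (s : String) : Int := solutionAltGo s.toList * 2

-- ===== PRECONDITION & SPEC =====
def Spec_solution (s : String) (out : Int) : Prop := out = solution_alt s
instance (s : String) (out : Int) : Decidable (Spec_solution s out) := by unfold Spec_solution; infer_instance

-- ===== CLAIM (what is proved, stated in full; the proofs are below) =====
def Claim_equal_solution : Prop := ∀ (s : String), Dom_solution s → Spec_solution s (solution s)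

-- ===== LEMMAS AND PROOFS =====

-- the inner fold from accumulator a adds the number of '<' characters
lemma inner_fold_count (l : List Char) (a : Int) :
    l.foldl (fun t d => if d = '<' then t + 1 else t) a = a + (l.count '<' : Int) := by
  induction l generalizing a with
  | nil => simp
  | cons c rest ih =>
    simp only [List.foldl_cons]
    by_cases h : c = '<'
    · rw [if_pos h, ih]
      simp [h, List.count_cons]
      ring
    · rw [if_neg h, ih]
      simp [List.count_cons, h, Ne.symm h]

-- the inner suffix count is the number of '<' characters
lemma inner_eq_count (l : List Char) : solutionAltInner l = (l.count '<' : Int) := by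
  simp [solutionAltInner, inner_fold_count]

-- loop invariant for A's fold
lemma foldA_snd (l : List Char) (cont ans : Int) :
    (l.foldl
      (fun (p : Int × Int) c =>
        let p := if c = '>' then (p.1 + 1, p.2) else p
        if c = '<' then (p.1, p.2 + p.1) else p)
      (cont, ans)).2 = ans + cont * (l.count '<' : Int) + solutionAltGo l := by
  induction l generalizing cont ans with
  | nil => simp [solutionAltGo]
  | cons c rest ih =>
    simp only [List.foldl_cons]
    by_cases hgt : c = '>'
    · subst hgt
      simp only [if_neg (by decide : ¬('>' = '<'))]
      rw [ih]
      simp [solutionAltGo, inner_eq_count]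
      ring
    · by_cases hlt : c = '<'
      · subst hlt
        simp only [if_neg (by decide : ¬('<' = '>'))]
        rw [ih]
        simp [solutionAltGo, hgt]
        ring
      · simp only [if_neg hgt, if_neg hlt]
        rw [ih]
        simp [solutionAltGo, hgt, hlt]

-- ===== VERDICT (by name: the statement is the Claim_ definition above) =====
theorem solution_spec : Claim_equal_solution := by
  intro s _
  unfold Spec_solution solution solution_alt
  simp only []
  rw [foldA_snd]
  ring
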